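-- pv_equiv track=rewrite | github.com/MaximinoCanhola/Programming-School- | Programação I/Exercicios das Folhas/Folha 3/prog folha 3 ex 8.py | capicua
-- ===== SOURCE A (Python) =====
-- def capicua(x:[]):
--     y = len(x)
--     if y == 0 or y == 1:
--         return True
--     else:
--         n = int(y/2)
--         for i in range(n):
--             if x[i] == x[y-1-i]:
--                 return True
--             return False
-- ===== SOURCE B (Python) =====
-- def capicua(x: []):
--     # Genuine palindrome test: compare the list with its reversal.
--     # This fixes A's evident bug (its unconditional `return False` makes the
--     # loop run only once, so A judges only the first/last pair).
--     return x == x[::-1]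
-- ===== Notes on version B (the rewrite author's own statement) =====
-- stated objective: simpler
-- what changed: Replaced A's index loop (broken by an unconditional return that makes it run once) by comparing the list with its reversal, a correct palindrome test.
-- intended difference: On lists of length >= 2 whose first and last elements are equal but which are not palindromes, A returns True (its loop returns after comparing only the first/last pair) while B returns False, which is the intended answer for a palindrome check. — e.g. on capicua([1, 2, 3, 1]): A returns true, B returns false
import Mathlib
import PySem

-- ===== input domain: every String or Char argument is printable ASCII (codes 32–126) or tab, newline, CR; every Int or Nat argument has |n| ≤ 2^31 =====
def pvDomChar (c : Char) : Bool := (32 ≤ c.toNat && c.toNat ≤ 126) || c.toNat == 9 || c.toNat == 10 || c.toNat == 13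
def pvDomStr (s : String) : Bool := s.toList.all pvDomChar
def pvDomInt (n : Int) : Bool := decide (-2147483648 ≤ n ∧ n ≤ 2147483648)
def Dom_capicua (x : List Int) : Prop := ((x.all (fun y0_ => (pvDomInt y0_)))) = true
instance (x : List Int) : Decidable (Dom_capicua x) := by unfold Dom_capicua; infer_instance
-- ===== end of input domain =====

-- B replaces A's broken loop by a whole-list reversal comparison (a correct palindrome test).

-- ===== PORT A =====
-- loop body of A: for i in range(n): if x[i] == x[y-1-i]: return True / return False
-- ([] case = loop exhausted without return; unreachable when y ≥ 2 since n = y // 2 ≥ 1)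
def capicuaGo (x : List Int) (y : Int) : List Int → Bool
  | [] => false
  | i :: _ =>
    if PySem.List.pyGet? x i == PySem.List.pyGet? x (y - 1 - i) then true else false

def capicua (x : List Int) : Bool :=
  let y : Int := x.length
  if y == 0 || y == 1 then true
  else
    -- int(y/2) = y // 2 for the nonnegative y = len(x)
    let n := PySem.Int.floordiv y 2
    capicuaGo x y (PySem.List.pyRange 0 n 1)

-- ===== PORT B =====
-- x == x[::-1]; slice? with step -1 is always `some` (step ≠ 0), the none branch is unreachable
def capicua_alt (x : List Int) : Bool :=
  match PySem.List.slice? x none none (-1) with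
  | some r => x == r
  | none => false

-- ===== PRECONDITION & SPEC =====
-- On lists of length ≥ 2 whose first and last elements are equal but which are not palindromes,
-- A returns True (its unconditional `return False` makes the loop compare only the first/last
-- pair) while B returns False, the intended answer for a palindrome check.
def D_capicua (x : List Int) : Prop :=
  2 ≤ x.length ∧ x.head? = x.getLast? ∧ x ≠ x.reverse
instance (x : List Int) : Decidable (D_capicua x) := by unfold D_capicua; infer_instance

def Spec_capicua (x : List Int) (out : Bool) : Prop := ¬ D_capicua x → out = capicua_alt x
instance (x : List Int) (out : Bool) : Decidable (Spec_capicua x out) := by unfold Spec_capicua; infer_instance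

def pvDiffWitness_capicua : List Int := [1, 2, 3, 1]
def pvDiffWitnessOut_capicua : Bool × Bool := (true, false)

-- ===== CLAIM (what is proved, stated in full; the proofs are below) =====
def Claim_unchanged_capicua : Prop := ∀ (x : List Int), Dom_capicua x → Spec_capicua x (capicua x)
def Claim_changed_capicua : Prop := Dom_capicua (pvDiffWitness_capicua) ∧ D_capicua (pvDiffWitness_capicua) ∧ capicua (pvDiffWitness_capicua) = pvDiffWitnessOut_capicua.1 ∧ capicua_alt (pvDiffWitness_capicua) = pvDiffWitnessOut_capicua.2 ∧ pvDiffWitnessOut_capicua.1 ≠ pvDiffWitnessOut_capicua.2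
def Claim_exact_capicua : Prop := ∀ (x : List Int), Dom_capicua x → D_capicua x → capicua x ≠ capicua_alt x

-- ===== LEMMAS AND PROOFS =====

-- B computes `decide (x = x.reverse)`
theorem capicua_alt_eq (x : List Int) : capicua_alt x = decide (x = x.reverse) := by
  unfold capicua_alt
  rw [PySem.List.slice?_none_none_neg_one]
  simp [Bool.beq_eq_decide_eq]

-- A computes `first/last pair equal (or length ≤ 1)`
theorem capicua_eq (x : List Int) :
    capicua x = (decide (x.length ≤ 1) || decide (x.head? = x.getLast?)) := by
  unfold capicua
  rcases x with _ | ⟨a, _ | ⟨b, t⟩⟩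
  · decide
  · simp
  · have hlen : ¬(((a :: b :: t).length : Int) == 0 || ((a :: b :: t).length : Int) == 1) = true := by
      simp; omega
    simp only [hlen]
    have hn : (0:Int) < PySem.Int.floordiv ((a :: b :: t).length : Int) 2 := by
      unfold PySem.Int.floordiv; rw [Int.fdiv_eq_ediv]; simp; omega
    rw [PySem.List.pyRange_one_cons hn]
    show (if PySem.List.pyGet? (a :: b :: t) 0 ==
            PySem.List.pyGet? (a :: b :: t) (((a :: b :: t).length : Int) - 1 - 0) then true else false) = _
    rw [show (((a :: b :: t).length : Int) - 1 - 0) = ((t.length + 1 : Nat) : Int) by simp]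
    rw [PySem.List.pyGet?_natCast, List.getLast?_eq_getElem?]
    have h1 : (decide ((a :: b :: t).length ≤ 1)) = false := by simp
    have h0 : (0:Int) ≤ (t.length:Int) + 1 := by positivity
    simp [h0, Bool.beq_eq_decide_eq, PySem.List.pyGet?, PySem.List.pyIdx?]

theorem head_eq_last_of_self_reverse (x : List Int) (h : x = x.reverse) :
    x.head? = x.getLast? := by
  conv_lhs => rw [h]
  rw [List.head?_reverse]

-- ===== VERDICT (by name: the statement is the Claim_ definition above) =====
theorem capicua_spec : Claim_unchanged_capicua := by
  intro x _ hnd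
  simp only [D_capicua, not_and, not_not] at hnd
  rw [capicua_eq, capicua_alt_eq]
  by_cases hlen : x.length ≤ 1
  · have hx : x = x.reverse := by
      match x, hlen with
      | [], _ => rfl
      | [a], _ => rfl
    simp [hlen, decide_eq_true hx]
  · have h2 : 2 ≤ x.length := by omega
    by_cases hfl : x.head? = x.getLast?
    · have hrev := hnd h2 hfl
      simp [hfl, decide_eq_true hrev]
    · have hrev : x ≠ x.reverse := fun h => hfl (head_eq_last_of_self_reverse x h)
      simp [hlen, hfl, decide_eq_false hrev]

theorem capicua_changed : Claim_changed_capicua := by unfold Claim_changed_capicua; decide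

theorem capicua_tight : Claim_exact_capicua := by
  intro x _ hd
  obtain ⟨h2, hfl, hrev⟩ := hd
  rw [capicua_eq, capicua_alt_eq]
  have hlen : ¬ x.length ≤ 1 := by omega
  simp [hlen, hfl, decide_eq_false hrev]
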